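-- pv_equiv track=rewrite | github.com/ushasi-bhowmick/alienworlds | alienworlds/plots/ex_diagnostics.py | zip_hist
-- ===== SOURCE A (Python) =====
-- def zip_hist(arr1,method, unique_methods):
--     net=[]
--     for el in unique_methods:
--         temp1=[]
--         for i in range(0, len(arr1)):
--             if(el==method[i]):
--                 temp1.append(arr1[i])
--         net.append(temp1)
--     return(net)
-- ===== SOURCE B (Python) =====
-- def zip_hist(arr1, method, unique_methods):
--     groups = {}
--     for m, a in zip(method, arr1):
--         groups.setdefault(m, []).append(a)
--     return [groups.get(el, []) for el in unique_methods]
-- ===== Notes on version B (the rewrite author's own statement) =====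
-- stated objective: faster
-- what changed: Replaces the O(U*n) nested rescans (one full pass over arr1 per unique method) by a single grouping pass building a dict method->list plus one lookup per unique method; intended as faster (measured 3.1x at n=4096, the largest size a timing run finished).
import Mathlib
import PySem

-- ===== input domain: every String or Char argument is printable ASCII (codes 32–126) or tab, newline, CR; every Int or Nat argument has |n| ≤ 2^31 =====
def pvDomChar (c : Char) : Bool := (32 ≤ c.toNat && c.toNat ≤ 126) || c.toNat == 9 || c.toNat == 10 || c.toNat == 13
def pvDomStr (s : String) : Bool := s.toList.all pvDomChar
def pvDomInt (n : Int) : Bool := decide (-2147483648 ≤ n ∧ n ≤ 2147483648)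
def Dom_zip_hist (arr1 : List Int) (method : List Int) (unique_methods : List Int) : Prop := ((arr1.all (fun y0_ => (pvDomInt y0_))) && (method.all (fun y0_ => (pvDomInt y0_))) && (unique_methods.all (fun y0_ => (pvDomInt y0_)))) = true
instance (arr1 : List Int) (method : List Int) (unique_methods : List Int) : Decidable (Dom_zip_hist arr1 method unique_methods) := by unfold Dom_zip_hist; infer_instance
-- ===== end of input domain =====

-- B replaces A's per-method rescan of arr1 by one grouping pass (dict method -> list) plus one
-- lookup per unique method (intended as faster; a timing run measured 3.1x at n=4096).
-- Equivalence is proved on Pre_ (where A does not raise IndexError).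

-- ===== PORT A =====
-- Literal port of A: outer loop over unique_methods appending one inner-loop result per element;
-- inner loop over range(0, len(arr1)) indexing method[i] / arr1[i] (pyGetD: total form, exact
-- under Pre_ which guarantees every index is in range for both lists).
def zip_hist (arr1 : List Int) (method : List Int) (unique_methods : List Int) : List (List Int) :=
  unique_methods.foldl
    (fun net el =>
      net ++ [(PySem.List.pyRange 0 arr1.length 1).foldl
        (fun temp1 i =>
          if el == PySem.List.pyGetD method i 0 then temp1 ++ [PySem.List.pyGetD arr1 i 0]
          else temp1) []])
    []

-- ===== PORT B =====
def zip_hist_alt (arr1 : List Int) (method : List Int) (unique_methods : List Int) : List (List Int) :=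
  let groups := (method.zip arr1).foldl
    (fun d p => d.modify p.1 [] (· ++ [p.2])) (PySem.Dict.empty)
  unique_methods.map (fun el => groups.getD el [])

-- ===== PRECONDITION & SPEC =====
-- Pre_ excludes exactly the inputs where A raises IndexError: method shorter than arr1 while
-- unique_methods forces the inner loop to run.
def Pre_zip_hist (arr1 : List Int) (method : List Int) (unique_methods : List Int) : Prop :=
  arr1.length ≤ method.length ∨ unique_methods = []
instance (arr1 : List Int) (method : List Int) (unique_methods : List Int) : Decidable (Pre_zip_hist arr1 method unique_methods) := by unfold Pre_zip_hist; infer_instance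
def pvWitness_zip_hist : List Int × List Int × List Int := ([1, 2, 3], [7, 8, 7], [7, 8])

def Spec_zip_hist (arr1 : List Int) (method : List Int) (unique_methods : List Int) (out : List (List Int)) : Prop := out = zip_hist_alt arr1 method unique_methods
instance (arr1 : List Int) (method : List Int) (unique_methods : List Int) (out : List (List Int)) : Decidable (Spec_zip_hist arr1 method unique_methods out) := by unfold Spec_zip_hist; infer_instance

-- ===== CLAIM (what is proved, stated in full; the proofs are below) =====
def Claim_equal_zip_hist : Prop := ∀ (arr1 : List Int) (method : List Int) (unique_methods : List Int), Dom_zip_hist arr1 method unique_methods → Pre_zip_hist arr1 method unique_methods → Spec_zip_hist arr1 method unique_methods (zip_hist arr1 method unique_methods)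

-- ===== LEMMAS AND PROOFS =====

-- A's inner loop over indices equals the filtered/projected zip of (method, arr1).
lemma zip_hist_inner (el : Int) (arr1 method : List Int) (h : arr1.length ≤ method.length)
    (acc : List Int) :
    (List.range arr1.length).foldl
      (fun temp1 k =>
        if el == method.getD k 0 then temp1 ++ [arr1.getD k 0] else temp1) acc
    = acc ++ ((method.zip arr1).filter (fun p => p.1 == el)).map (·.2) := by
  induction arr1 generalizing method acc with
  | nil => simp
  | cons a as ih =>
    cases method with
    | nil => simp at h
    | cons m ms =>
      simp only [List.length_cons, List.range_succ_eq_map, List.foldl_cons, List.foldl_map,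
        List.getD_cons_succ, List.getD_cons_zero, List.zip_cons_cons, List.filter_cons]
      have hle : as.length ≤ ms.length := by simpa using h
      rw [ih ms hle]
      by_cases hm : el = m
      · subst hm; simp
      · have h1 : (el == m) = false := by simp [hm]
        have h2 : (m == el) = false := by simp [Ne.symm hm]
        simp [h1, h2]

theorem zip_hist_spec : Claim_equal_zip_hist := by
  intro arr1 method um _ hpre
  unfold Spec_zip_hist zip_hist zip_hist_alt
  rcases hpre with h | h
  · rw [PySem.List.foldl_append_singleton_eq_map]
    apply List.map_congr_left
    intro el _
    rw [PySem.Dict.getD_foldl_modify_append]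
    rw [PySem.List.pyRange_one, List.foldl_map]
    have := zip_hist_inner el arr1 method h ([] : List Int)
    simp only [Int.sub_zero, Int.toNat_natCast, List.nil_append] at this ⊢
    rw [← this]
    apply PySem.List.foldl_congr_mem
    intro t k _
    simp
  · subst h; rfl


-- ===== VERDICT (by name: the statement is the Claim_ definition above) =====
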